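-- pv_equiv track=rewrite | github.com/hoseong0422/BaekJoon | 프로그래머스/unrated/181887. 홀수 vs 짝수/홀수 vs 짝수.py | solution
-- ===== SOURCE A (Python) =====
-- def solution(num_list):
--     odd_sum = 0
--     even_sum = 0
--     init = 1
--     for i in num_list:
--         if init % 2 == 0:
--             even_sum += i
--         else:
--             odd_sum += i
--         init += 1
--     if even_sum > odd_sum:
--         return even_sum
--     elif even_sum < odd_sum:
--         return odd_sum
--     else:
--         return odd_sum
-- ===== SOURCE B (Python) =====
-- def solution(num_list):
--     odd_total = sum(num_list[::2])
--     even_total = sum(num_list[1::2])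
--     return max(odd_total, even_total)
-- ===== Notes on version B (the rewrite author's own statement) =====
-- stated objective: idiomatic
-- what changed: Replaces the single interleaved loop with an explicit position counter and two running accumulators by two strided slices (num_list[::2], num_list[1::2]) summed separately, with max() instead of the comparison chain.
import Mathlib
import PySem

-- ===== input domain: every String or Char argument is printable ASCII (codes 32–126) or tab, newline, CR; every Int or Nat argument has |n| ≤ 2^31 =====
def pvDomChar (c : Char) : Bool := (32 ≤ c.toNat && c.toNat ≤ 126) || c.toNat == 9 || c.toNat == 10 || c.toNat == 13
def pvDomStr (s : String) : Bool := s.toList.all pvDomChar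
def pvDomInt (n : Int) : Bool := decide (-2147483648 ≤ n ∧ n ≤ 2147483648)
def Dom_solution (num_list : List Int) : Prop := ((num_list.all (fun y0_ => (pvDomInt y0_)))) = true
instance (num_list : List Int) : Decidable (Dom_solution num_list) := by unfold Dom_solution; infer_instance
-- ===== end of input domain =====

-- B sums the two strided slices num_list[::2] / num_list[1::2] and takes max, instead of
-- A's single loop with a position counter and two accumulators; same O(n) cost, more idiomatic.

-- ===== PORT A =====
-- the for-loop over (odd_sum, even_sum, init)
def solution (num_list : List Int) : Int :=
  let st := num_list.foldl
    (fun (st : Int × Int × Int) i =>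
      let odd_sum := st.1; let even_sum := st.2.1; let init := st.2.2
      if PySem.Int.mod init 2 = 0 then (odd_sum, even_sum + i, init + 1)
      else (odd_sum + i, even_sum, init + 1))
    (0, 0, 1)
  let odd_sum := st.1; let even_sum := st.2.1
  if even_sum > odd_sum then even_sum
  else if even_sum < odd_sum then odd_sum
  else odd_sum

-- ===== PORT B =====
def solution_alt (num_list : List Int) : Int :=
  let odd_total := ((PySem.List.slice? num_list none none 2).getD []).sum
  let even_total := ((PySem.List.slice? num_list (some 1) none 2).getD []).sum
  max odd_total even_total

-- ===== PRECONDITION & SPEC =====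
def Spec_solution (num_list : List Int) (out : Int) : Prop := out = solution_alt num_list
instance (num_list : List Int) (out : Int) : Decidable (Spec_solution num_list out) := by unfold Spec_solution; infer_instance

-- ===== CLAIM (what is proved, stated in full; the proofs are below) =====
def Claim_equal_solution : Prop := ∀ (num_list : List Int), Dom_solution num_list → Spec_solution num_list (solution num_list)

-- ===== LEMMAS AND PROOFS =====

def evens : List Int → List Int
  | [] => []
  | [x] => [x]
  | x :: _ :: xs => x :: evens xs

theorem filterMap_even_idx (xs : List Int) :
    (List.range ((xs.length + 1) / 2)).filterMap (fun k => xs[2 * k]?) = evens xs := by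
  induction xs using evens.induct with
  | case1 => simp [evens]
  | case2 x => simp [evens]
  | case3 x y xs ih =>
    have h : ((x :: y :: xs).length + 1) / 2 = (xs.length + 1) / 2 + 1 := by
      simp; omega
    rw [h, List.range_succ_eq_map, List.filterMap_cons, List.filterMap_map]
    have h0 : (x :: y :: xs)[2 * 0]? = some x := by simp
    rw [h0]
    simp only [evens]
    congr 1

theorem slice_evens (xs : List Int) :
    PySem.List.slice? xs none none 2 = some (evens xs) := by
  rw [PySem.List.slice?, PySem.List.sliceIndices]
  norm_num
  rw [← filterMap_even_idx]
  have hc : (if 0 < xs.length then (((xs.length:Int) + 2 - 1) / 2).toNat else 0) = (xs.length + 1) / 2 := by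
    split_ifs <;> omega
  rw [hc]
  apply List.filterMap_congr
  intro k _
  congr 1

theorem filterMap_odd_idx (xs : List Int) :
    (List.range (xs.length / 2)).filterMap (fun k => xs[2 * k + 1]?) = evens xs.tail := by
  induction xs using evens.induct with
  | case1 => simp [evens]
  | case2 x => simp [evens]
  | case3 x y xs ih =>
    have h : (x :: y :: xs).length / 2 = xs.length / 2 + 1 := by
      simp; omega
    rw [h, List.range_succ_eq_map, List.filterMap_cons, List.filterMap_map]
    have h0 : (x :: y :: xs)[2 * 0 + 1]? = some y := by simp
    rw [h0]
    simp only [List.tail_cons]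
    cases xs with
    | nil => simp [evens]
    | cons z zs =>
      simp only [evens]
      congr 1

theorem slice_odds (xs : List Int) :
    PySem.List.slice? xs (some 1) none 2 = some (evens xs.tail) := by
  rw [PySem.List.slice?, PySem.List.sliceIndices]
  norm_num
  rw [← filterMap_odd_idx]
  cases xs with
  | nil => simp
  | cons a l =>
    have hm : min (1:Int) ((a :: l).length : Int) = 1 := by simp
    rw [hm]
    have hc : (if 1 < (a :: l).length then (((( (a :: l).length :Int)) - 1 + 2 - 1) / 2).toNat else 0)
        = (a :: l).length / 2 := by
      split_ifs <;> simp_all <;> omega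
    rw [hc]
    apply List.filterMap_congr
    intro k _
    congr 1
    omega

theorem loop_inv (xs : List Int) : ∀ (o e j : Int), PySem.Int.mod j 2 = 1 →
    xs.foldl
      (fun (st : Int × Int × Int) i =>
        let odd_sum := st.1; let even_sum := st.2.1; let init := st.2.2
        if PySem.Int.mod init 2 = 0 then (odd_sum, even_sum + i, init + 1)
        else (odd_sum + i, even_sum, init + 1))
      (o, e, j)
    = (o + (evens xs).sum, e + (evens xs.tail).sum, j + xs.length) := by
  induction xs using evens.induct with
  | case1 => intro o e j h; simp [evens]
  | case2 x =>
    intro o e j h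
    have hne : ¬ PySem.Int.mod j 2 = 0 := by rw [h]; norm_num
    simp only [List.foldl_cons, List.foldl_nil, evens]
    rw [if_neg hne]
    simp [evens]
  | case3 x y xs ih =>
    intro o e j h
    have h1 : PySem.Int.mod (j + 1) 2 = 0 := by
      simp [PySem.Int.mod, Int.fmod_eq_emod] at *; omega
    have h2 : PySem.Int.mod (j + 1 + 1) 2 = 1 := by
      simp [PySem.Int.mod, Int.fmod_eq_emod] at *; omega
    simp only [List.foldl_cons]
    have hne : ¬ PySem.Int.mod j 2 = 0 := by rw [h]; norm_num
    rw [if_neg hne, if_pos h1]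
    rw [ih (o + x) (e + y) (j + 1 + 1) h2]
    have hy : (evens (y :: xs)).sum = y + (evens xs.tail).sum := by
      cases xs <;> simp [evens]
    simp only [evens, List.sum_cons, List.tail_cons, List.length_cons, Prod.mk.injEq, hy]
    refine ⟨by ring, by ring, by push_cast; ring⟩

-- ===== VERDICT (by name: the statement is the Claim_ definition above) =====
theorem solution_spec : Claim_equal_solution := by
  intro xs _
  unfold Spec_solution solution solution_alt
  rw [loop_inv xs 0 0 1 (by decide)]
  simp only [slice_evens, slice_odds, Option.getD_some, zero_add]
  split_ifs <;> omega
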